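-- pv_equiv track=rewrite | github.com/KeykoLi/Algo_Labs | lab4/lab4.py | is_not_fully_zero
-- ===== SOURCE A (Python) =====
-- def is_not_fully_zero(matrix):
--     rows = len(matrix)
--     first_column = [matrix[i][0] for i in range(rows)]
--     last_column = [matrix[i][-1] for i in range(rows)]
--
--     # Перевірка першого стовпця
--     if all(value == 0 for value in first_column):
--         if all (value == 0 for value in last_column):
--             return False
--         else:
--             return True
--     else:
--         return True
-- ===== SOURCE B (Python) =====
-- def is_not_fully_zero(matrix):
--     for row in matrix:
--         if row[0] != 0 or row[-1] != 0:
--             return True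
--     return False
-- ===== Notes on version B (the rewrite author's own statement) =====
-- stated objective: simpler
-- what changed: B replaces A's two materialised column lists and two full all() scans with a single early-exit pass that returns True at the first row whose first or last entry is nonzero.
import Mathlib
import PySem

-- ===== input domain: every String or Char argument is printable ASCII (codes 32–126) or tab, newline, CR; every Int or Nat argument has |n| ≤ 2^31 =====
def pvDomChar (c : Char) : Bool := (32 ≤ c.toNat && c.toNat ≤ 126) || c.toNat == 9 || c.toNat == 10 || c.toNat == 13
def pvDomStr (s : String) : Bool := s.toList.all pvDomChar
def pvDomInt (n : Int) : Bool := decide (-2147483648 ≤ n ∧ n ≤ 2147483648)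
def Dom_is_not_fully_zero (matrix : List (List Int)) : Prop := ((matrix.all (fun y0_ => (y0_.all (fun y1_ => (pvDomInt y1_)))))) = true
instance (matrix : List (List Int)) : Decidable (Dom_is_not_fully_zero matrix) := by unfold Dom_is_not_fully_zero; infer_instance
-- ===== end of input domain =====

-- B fuses A's two materialised column lists and two all() scans into one early-exit pass per row (objective: simpler).

-- ===== PORT A =====
-- A builds first_column and last_column via matrix[i][0] / matrix[i][-1]; under Pre_ every row is
-- nonempty so the indexings succeed; .getD 0 is only reached outside Pre_.
def is_not_fully_zero (matrix : List (List Int)) : Bool :=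
  let first_column := matrix.map (fun row => (PySem.List.pyGet? row 0).getD 0)
  let last_column := matrix.map (fun row => (PySem.List.pyGet? row (-1)).getD 0)
  if first_column.all (fun value => value == 0) then
    if last_column.all (fun value => value == 0) then false else true
  else true

-- ===== PORT B =====
-- single early-exit pass over the rows
def is_not_fully_zero_alt (matrix : List (List Int)) : Bool :=
  match matrix with
  | [] => false
  | row :: rest =>
    if (PySem.List.pyGet? row 0).getD 0 ≠ 0 ∨ (PySem.List.pyGet? row (-1)).getD 0 ≠ 0 then
      true
    else
      is_not_fully_zero_alt rest

-- ===== PRECONDITION & SPEC =====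
-- Pre_ excludes matrices containing an empty row: there A raises IndexError (matrix[i][0]).
def Pre_is_not_fully_zero (matrix : List (List Int)) : Prop :=
  ∀ row ∈ matrix, row ≠ []
instance (matrix : List (List Int)) : Decidable (Pre_is_not_fully_zero matrix) := by
  unfold Pre_is_not_fully_zero; infer_instance

def pvWitness_is_not_fully_zero : List (List Int) := [[0, 1, 0], [0, 0, 0]]

def Spec_is_not_fully_zero (matrix : List (List Int)) (out : Bool) : Prop := out = is_not_fully_zero_alt matrix
instance (matrix : List (List Int)) (out : Bool) : Decidable (Spec_is_not_fully_zero matrix out) := by unfold Spec_is_not_fully_zero; infer_instance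

-- ===== CLAIM (what is proved, stated in full; the proofs are below) =====
def Claim_equal_is_not_fully_zero : Prop := ∀ (matrix : List (List Int)), Dom_is_not_fully_zero matrix → Pre_is_not_fully_zero matrix → Spec_is_not_fully_zero matrix (is_not_fully_zero matrix)

-- ===== LEMMAS AND PROOFS =====

lemma is_not_fully_zero_eq (matrix : List (List Int)) :
    is_not_fully_zero matrix = is_not_fully_zero_alt matrix := by
  induction matrix with
  | nil => decide
  | cons row rest ih =>
    simp only [is_not_fully_zero, List.map_cons, List.all_cons] at *
    simp only [is_not_fully_zero_alt]
    by_cases h0 : (PySem.List.pyGet? row 0).getD 0 = 0 <;>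
      by_cases h1 : (PySem.List.pyGet? row (-1)).getD 0 = 0 <;>
        simp [h0, h1] at ih ⊢ <;> try simp [← ih]

-- ===== VERDICT (by name: the statement is the Claim_ definition above) =====
theorem is_not_fully_zero_spec : Claim_equal_is_not_fully_zero := by
  intro matrix _ _
  exact (is_not_fully_zero_eq matrix)
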